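-- pv_equiv track=rewrite | github.com/Soham-03/spcc | macro_pass2.py | expand_macros
-- ===== SOURCE A (Python) =====
-- def expand_macros(input_lines, MNT, MDT):
--     expanded_code = []
--     in_macro = False
--
--     for line in input_lines:
--         stripped_line = line.strip()
--         if stripped_line in MNT:
--             # Macro invocation found, expand it
--             mdt_index = MNT[stripped_line] - 1  # Adjusting index as MNT is 1-based
--             while MDT[mdt_index] != "MEND":
--                 expanded_code.append(MDT[mdt_index])
--                 mdt_index += 1
--         else:
--             # Not a macro invocation, add it to expanded code
--             expanded_code.append(stripped_line)
--
--     return expanded_code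
-- ===== SOURCE B (Python) =====
-- def expand_macros(input_lines, MNT, MDT):
--     # Pass 1: strip once, find which names are actually invoked, and build an
--     # expansion table name -> body lines (MNT is 1-based; 'MEND' is excluded).
--     stripped = [line.strip() for line in input_lines]
--     invoked = set(stripped)
--     table = {}
--     for name, start in MNT.items():
--         if name in invoked:
--             body = []
--             j = start - 1
--             while MDT[j] != "MEND":
--                 body.append(MDT[j])
--                 j += 1
--             table[name] = body
--     # Pass 2: flat emission using the table.
--     out = []
--     for s in stripped:
--         if s in table:
--             out.extend(table[s])
--         else:
--             out.append(s)
--     return out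
-- ===== Notes on version B (the rewrite author's own statement) =====
-- stated objective: alternative
-- what changed: B separates table-building from emission: one pass precomputes each invoked macro's body (scanning MDT once per distinct invoked name) into a dict, then a flat second pass emits either the cached body or the stripped line, instead of re-scanning MDT at every invocation as A does.
import Mathlib
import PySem

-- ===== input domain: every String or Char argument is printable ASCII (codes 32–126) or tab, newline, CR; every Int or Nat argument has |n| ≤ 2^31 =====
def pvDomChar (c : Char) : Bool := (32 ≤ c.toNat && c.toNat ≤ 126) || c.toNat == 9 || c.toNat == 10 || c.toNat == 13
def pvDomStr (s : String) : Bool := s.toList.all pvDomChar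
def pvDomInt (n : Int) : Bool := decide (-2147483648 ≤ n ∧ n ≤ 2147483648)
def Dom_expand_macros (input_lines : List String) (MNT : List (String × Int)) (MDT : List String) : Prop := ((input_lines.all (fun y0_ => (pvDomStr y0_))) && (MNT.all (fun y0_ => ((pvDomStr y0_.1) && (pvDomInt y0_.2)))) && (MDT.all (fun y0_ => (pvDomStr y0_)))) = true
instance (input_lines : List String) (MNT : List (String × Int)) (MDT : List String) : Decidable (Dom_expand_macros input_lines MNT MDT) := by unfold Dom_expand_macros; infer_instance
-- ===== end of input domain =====

-- B precomputes each invoked macro's body into a table once and emits in a flat second pass, instead of re-scanning MDT at every invocation (alternative decomposition).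


-- ===== PORT A =====
-- A's inner while loop: append MDT[mdt_index] until it equals "MEND".
-- PySem.List.pyGet? is exact Python indexing (negative indices from the end;
-- none = IndexError, excluded by Pre_). The fuel 2*|MDT|+2 strictly exceeds the
-- iteration count of every terminating scan (at most |MDT| negative-phase steps
-- plus |MDT| positive-phase steps), so under Pre_ it is never exhausted.
def pvScanA (MDT : List String) : Nat → Int → List String → List String
  | 0, _, acc => acc
  | fuel + 1, j, acc =>
    match PySem.List.pyGet? MDT j with
    | none => acc
    | some l => if l = "MEND" then acc else pvScanA MDT fuel (j + 1) (acc ++ [l])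

def expand_macros (input_lines : List String) (MNT : List (String × Int)) (MDT : List String) : List String :=
  input_lines.foldl
    (fun expanded_code line =>
      let stripped_line := PySem.Str.strip line
      match (PySem.Dict.ofList MNT).get? stripped_line with
      | some v => pvScanA MDT (2 * MDT.length + 2) (v - 1) expanded_code
      | none => expanded_code ++ [stripped_line])
    []

-- ===== PORT B =====
-- Source B's body-collecting while loop (same Python indexing and fuel bound as A's scan).
def pvScanB (MDT : List String) : Nat → Int → List String
  | 0, _ => []
  | fuel + 1, j =>
    match PySem.List.pyGet? MDT j with
    | none => []
    | some l => if l = "MEND" then [] else l :: pvScanB MDT fuel (j + 1)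

def expand_macros_alt (input_lines : List String) (MNT : List (String × Int)) (MDT : List String) : List String :=
  let stripped := input_lines.map PySem.Str.strip
  let invoked : PySem.Set String := PySem.Set.ofList stripped
  let table :=
    (PySem.Dict.ofList MNT).items.foldl
      (fun t p =>
        if PySem.Set.contains invoked p.1 then
          t.insert p.1 (pvScanB MDT (2 * MDT.length + 2) (p.2 - 1))
        else t)
      PySem.Dict.empty
  stripped.foldl
    (fun out s =>
      match table.get? s with
      | some body => out ++ body
      | none => out ++ [s])
    []

-- ===== PRECONDITION & SPEC =====
-- Closed form of "the scan started at index v-1 reaches 'MEND' without an IndexError":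
-- from a nonnegative start 'MEND' must occur at or after it; from a negative in-range
-- start the scan wraps (Python negative indexing) into a full left-to-right sweep, so
-- it terminates iff 'MEND' occurs anywhere in MDT.
def pvScanOK (MDT : List String) (v : Int) : Bool :=
  (decide (1 ≤ v) && decide ("MEND" ∈ MDT.drop (v - 1).toNat)) ||
  (decide (v < 1) && decide (-(MDT.length : Int) ≤ v - 1) && decide ("MEND" ∈ MDT))

-- Pre_ excludes exactly the inputs on which the Python A raises an IndexError
-- (some invoked macro's scan runs off MDT without meeting "MEND"); B raises there too.
def Pre_expand_macros (input_lines : List String) (MNT : List (String × Int)) (MDT : List String) : Prop :=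
  (input_lines.all (fun line =>
    match (PySem.Dict.ofList MNT).get? (PySem.Str.strip line) with
    | some v => pvScanOK MDT v
    | none => true)) = true

instance (input_lines : List String) (MNT : List (String × Int)) (MDT : List String) : Decidable (Pre_expand_macros input_lines MNT MDT) := by unfold Pre_expand_macros; infer_instance

def pvWitness_expand_macros : List String × (List (String × Int)) × List String :=
  ([" M1 ", "x"], [("M1", 1)], ["LOAD A", "MEND"])

def Spec_expand_macros (input_lines : List String) (MNT : List (String × Int)) (MDT : List String) (out : List String) : Prop := out = expand_macros_alt input_lines MNT MDT
instance (input_lines : List String) (MNT : List (String × Int)) (MDT : List String) (out : List String) : Decidable (Spec_expand_macros input_lines MNT MDT out) := by unfold Spec_expand_macros; infer_instance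

-- ===== CLAIM (what is proved, stated in full; the proofs are below) =====
def Claim_equal_expand_macros : Prop := ∀ (input_lines : List String) (MNT : List (String × Int)) (MDT : List String), Dom_expand_macros input_lines MNT MDT → Pre_expand_macros input_lines MNT MDT → Spec_expand_macros input_lines MNT MDT (expand_macros input_lines MNT MDT)

-- ===== LEMMAS AND PROOFS =====

-- A's accumulator scan is the accumulator followed by B's collected body
-- (same fuel, same index, step for step).
theorem pvScanA_eq_append (MDT : List String) :
    ∀ (fuel : Nat) (j : Int) (acc : List String),
      pvScanA MDT fuel j acc = acc ++ pvScanB MDT fuel j := by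
  intro fuel
  induction fuel with
  | zero => intro j acc; simp [pvScanA, pvScanB]
  | succ n ih =>
    intro j acc
    simp only [pvScanA, pvScanB]
    cases h : PySem.List.pyGet? MDT j with
    | none => simp
    | some l =>
      by_cases hl : l = "MEND" <;> simp [hl, ih]

-- B's table-building fold leaves a key it never inserts untouched.
theorem pvFold_get?_not_mem (invoked : PySem.Set String) (MDT : List String)
    (l : List (String × Int)) (t : PySem.Dict String (List String)) (s : String)
    (hs : s ∉ l.map Prod.fst) :
    (l.foldl (fun t p =>
        if PySem.Set.contains invoked p.1 then
          t.insert p.1 (pvScanB MDT (2 * MDT.length + 2) (p.2 - 1))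
        else t) t).get? s = t.get? s := by
  induction l generalizing t with
  | nil => rfl
  | cons p rest ih =>
    simp only [List.map_cons, List.mem_cons, not_or] at hs
    simp only [List.foldl_cons]
    rw [ih _ hs.2]
    split_ifs with h
    · exact PySem.Dict.get?_insert_of_ne t _ hs.1
    · rfl

-- Lookup in B's table: for keys the pair list (with unique keys) binds, the stored
-- body if the key is invoked; otherwise the initial table's answer.
theorem pvFold_get? (invoked : PySem.Set String) (MDT : List String)
    (l : List (String × Int)) (t : PySem.Dict String (List String)) (s : String)
    (hnd : (l.map Prod.fst).Nodup) :
    (l.foldl (fun t p =>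
        if PySem.Set.contains invoked p.1 then
          t.insert p.1 (pvScanB MDT (2 * MDT.length + 2) (p.2 - 1))
        else t) t).get? s =
      match (PySem.Dict.mk l).get? s with
      | some v => if PySem.Set.contains invoked s then
                    some (pvScanB MDT (2 * MDT.length + 2) (v - 1))
                  else t.get? s
      | none => t.get? s := by
  induction l generalizing t with
  | nil => simp [PySem.Dict.get?]
  | cons p rest ih =>
    obtain ⟨k, v⟩ := p
    simp only [List.map_cons, List.nodup_cons] at hnd
    simp only [List.foldl_cons]
    rw [PySem.Dict.get?_mk_cons]
    by_cases hks : k = s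
    · subst hks
      simp only [beq_self_eq_true, if_true]
      rw [pvFold_get?_not_mem invoked MDT rest _ k hnd.1]
      split_ifs with h
      · exact PySem.Dict.get?_insert_self t k _
      · rfl
    · have hbeq : (k == s) = false := by simp [hks]
      rw [hbeq]
      simp only [Bool.false_eq_true, if_false]
      rw [ih _ hnd.2]
      have hins : (if PySem.Set.contains invoked k = true then
          t.insert k (pvScanB MDT (2 * MDT.length + 2) (v - 1)) else t).get? s = t.get? s := by
        split_ifs with hk
        · exact PySem.Dict.get?_insert_of_ne t _ (Ne.symm hks)
        · rfl
      cases (PySem.Dict.mk rest).get? s <;> rw [hins]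

-- The two programs agree on every input (the fuel makes both ports total;
-- Pre_ is needed only for fidelity to the Python, which raises outside it).
theorem pvMain_eq (input_lines : List String) (MNT : List (String × Int)) (MDT : List String) :
    expand_macros input_lines MNT MDT = expand_macros_alt input_lines MNT MDT := by
  unfold expand_macros expand_macros_alt
  simp only [List.foldl_map]
  apply PySem.List.foldl_congr_mem
  intro acc line hline
  have hmem : PySem.Str.strip line ∈ input_lines.map PySem.Str.strip :=
    List.mem_map_of_mem hline
  have hcont : (PySem.Set.ofList (input_lines.map PySem.Str.strip)).contains (PySem.Str.strip line) = true :=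
    (PySem.Set.contains_iff _ _).mpr ((PySem.Set.mem_ofList _ _).mpr hmem)
  have hnd : ((PySem.Dict.ofList MNT).items.map Prod.fst).Nodup :=
    PySem.Dict.nodup_keys_ofList MNT
  have htbl := pvFold_get? (PySem.Set.ofList (input_lines.map PySem.Str.strip)) MDT
      (PySem.Dict.ofList MNT).items PySem.Dict.empty (PySem.Str.strip line) hnd
  have heta : PySem.Dict.mk (PySem.Dict.ofList MNT).items = PySem.Dict.ofList MNT := rfl
  rw [heta] at htbl
  cases hg : (PySem.Dict.ofList MNT).get? (PySem.Str.strip line) with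
  | none =>
    simp only [hg] at htbl ⊢
    rw [htbl]
    rfl
  | some v =>
    simp only [hg] at htbl ⊢
    rw [htbl, hcont]
    simp [pvScanA_eq_append]

-- ===== VERDICT (by name: the statement is the Claim_ definition above) =====
theorem expand_macros_spec : Claim_equal_expand_macros := by
  intro input_lines MNT MDT _ _
  unfold Spec_expand_macros
  exact pvMain_eq input_lines MNT MDT
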